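-- pv_equiv track=rewrite | github.com/jej29/public_http_agent | agent/agent/core/serializer.py | _clean_file_paths_for_summary
-- ===== SOURCE A (Python) =====
-- from typing import Any, Dict, List
--
-- def _dedup_str_list(items: List[Any], limit: int | None = None) -> List[str]:
--     out: List[str] = []
--     seen = set()
--
--     for x in items or []:
--         s = str(x).strip()
--         if not s or s in seen:
--             continue
--         seen.add(s)
--         out.append(s)
--         if limit is not None and len(out) >= limit:
--             break
--
--     return out
--
-- def _clean_file_paths_for_summary(items: List[Any]) -> List[str]:
--     cleaned = _dedup_str_list(items)
--     if not cleaned: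
--         return []
--
--     strong: List[str] = []
--     weak: List[str] = []
--
--     for item in cleaned:
--         s = str(item).strip()
--         s_l = s.lower()
--
--         looks_absolute_unix = s.startswith("/var/") or s.startswith("/usr/") or s.startswith("/opt/") or s.startswith("/home/")
--         looks_windows = ":\\" in s or s[:2].endswith(":")
--         looks_code_path = "(" in s and ")" in s and ".php" in s_l
--
--         if looks_absolute_unix or looks_windows or looks_code_path:
--             strong.append(s)
--         else:
--             weak.append(s)
--
--     return (strong + weak)[:5]
-- ===== SOURCE B (Python) =====
-- def _clean_file_paths_for_summary(items):
--     seen = set()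
--     cleaned = []
--     for x in (items or []):
--         s = str(x).strip()
--         if s and s not in seen:
--             seen.add(s)
--             cleaned.append(s)
--
--     def rank(s):
--         sl = s.lower()
--         strong = (s.startswith(("/var/", "/usr/", "/opt/", "/home/"))
--                   or ":\\" in s
--                   or s[:2].endswith(":")
--                   or ("(" in s and ")" in s and ".php" in sl))
--         return 0 if strong else 1
--
--     return sorted(cleaned, key=rank)[:5]
-- ===== Notes on version B (the rewrite author's own statement) =====
-- stated objective: idiomatic
-- what changed: A's second pass appends into two separate strong/weak lists and concatenates them; B replaces that whole categorize-and-concatenate pass by one stable sort of the deduped list on a 0/1 rank key (sorted(cleaned, key=rank)[:5]), with the dedup done inline over a seen-set in a single positive-condition loop.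
import Mathlib
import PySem

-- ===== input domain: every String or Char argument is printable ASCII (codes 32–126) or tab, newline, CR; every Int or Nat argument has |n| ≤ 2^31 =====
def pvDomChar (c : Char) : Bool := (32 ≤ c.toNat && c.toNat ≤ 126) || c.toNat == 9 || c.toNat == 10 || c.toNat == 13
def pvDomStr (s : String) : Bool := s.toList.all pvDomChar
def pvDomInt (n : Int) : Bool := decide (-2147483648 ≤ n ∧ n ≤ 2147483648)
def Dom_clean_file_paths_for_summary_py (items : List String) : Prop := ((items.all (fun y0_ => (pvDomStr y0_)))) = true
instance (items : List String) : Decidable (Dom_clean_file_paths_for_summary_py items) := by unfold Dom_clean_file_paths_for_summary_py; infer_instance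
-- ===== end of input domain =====

-- B replaces A's two accumulator lists (strong/weak, then concatenated) by a single stable
-- sort of the deduped list on a 0/1 rank key; same return value, objective: idiomatic.

-- ===== PORT A =====
-- helper _dedup_str_list: loop with out/seen and the optional-limit break
def pv_dedup_go (limit : Option Int) : List String → List String → PySem.Set String → List String
  | [], out, _ => out
  | x :: rest, out, seen =>
    let s := PySem.Str.strip x
    if s = "" ∨ PySem.Set.contains seen s = true then pv_dedup_go limit rest out seen
    else
      let out' := out ++ [s]
      let seen' := PySem.Set.add seen s
      match limit with
      | none => pv_dedup_go limit rest out' seen'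
      | some l => if l ≤ (out'.length : Int) then out' else pv_dedup_go limit rest out' seen'

def pv_dedup_str_list (items : List String) (limit : Option Int) : List String :=
  pv_dedup_go limit items [] PySem.Set.empty

-- classify step of A's second loop: append s to strong or weak
def pv_classify_step (sw : List String × List String) (item : String) : List String × List String :=
  let s := PySem.Str.strip item
  let s_l := PySem.Str.lower s
  let looks_absolute_unix := PySem.Str.startswith s "/var/" || PySem.Str.startswith s "/usr/"
      || PySem.Str.startswith s "/opt/" || PySem.Str.startswith s "/home/"
  let looks_windows := PySem.Str.isIn ":\\" s || PySem.Str.endswith (PySem.Str.slice s none (some 2)) ":"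
  let looks_code_path := PySem.Str.isIn "(" s && PySem.Str.isIn ")" s && PySem.Str.isIn ".php" s_l
  if looks_absolute_unix || looks_windows || looks_code_path
  then (sw.1 ++ [s], sw.2) else (sw.1, sw.2 ++ [s])

def clean_file_paths_for_summary_py (items : List String) : List String :=
  let cleaned := pv_dedup_str_list items none
  if cleaned = [] then []
  else
    let sw := cleaned.foldl pv_classify_step ([], [])
    PySem.List.slice (sw.1 ++ sw.2) none (some 5)

-- ===== PORT B =====
-- Source B's dedup loop: one pass building (cleaned, seen)
def pv_clean_step (st : List String × PySem.Set String) (x : String) : List String × PySem.Set String :=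
  let s := PySem.Str.strip x
  if s ≠ "" ∧ PySem.Set.contains st.2 s = false then (st.1 ++ [s], PySem.Set.add st.2 s) else st

-- Source B's rank: 0 for "strong" paths, 1 otherwise
def pv_is_strong (s : String) : Bool :=
  let sl := PySem.Str.lower s
  PySem.Str.startswith s "/var/" || PySem.Str.startswith s "/usr/"
    || PySem.Str.startswith s "/opt/" || PySem.Str.startswith s "/home/"
    || PySem.Str.isIn ":\\" s || PySem.Str.endswith (PySem.Str.slice s none (some 2)) ":"
    || (PySem.Str.isIn "(" s && PySem.Str.isIn ")" s && PySem.Str.isIn ".php" sl)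

def pv_rank (s : String) : Int := if pv_is_strong s then 0 else 1

def clean_file_paths_for_summary_py_alt (items : List String) : List String :=
  let cleaned := (items.foldl pv_clean_step ([], PySem.Set.empty)).1
  PySem.List.slice (PySem.List.sorted cleaned pv_rank) none (some 5)

-- ===== PRECONDITION & SPEC =====
def Spec_clean_file_paths_for_summary_py (items : List String) (out : List String) : Prop := out = clean_file_paths_for_summary_py_alt items
instance (items : List String) (out : List String) : Decidable (Spec_clean_file_paths_for_summary_py items out) := by unfold Spec_clean_file_paths_for_summary_py; infer_instance

-- ===== CLAIM (what is proved, stated in full; the proofs are below) =====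
def Claim_equal_clean_file_paths_for_summary_py : Prop := ∀ (items : List String), Dom_clean_file_paths_for_summary_py items → Spec_clean_file_paths_for_summary_py items (clean_file_paths_for_summary_py items)

-- ===== LEMMAS AND PROOFS =====

-- step equations (rfl-level) for the ports' loops
theorem pv_insertBy_nil (b : String → String → Bool) (x : String) :
    PySem.List.insertBy b x [] = [x] := by simp [PySem.List.insertBy]

theorem pv_insertBy_cons_pos (b : String → String → Bool) (x y : String) (ys : List String)
    (h : b x y = true) : PySem.List.insertBy b x (y :: ys) = x :: y :: ys := by
  simp [PySem.List.insertBy, h]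

theorem pv_insertBy_cons_neg (b : String → String → Bool) (x y : String) (ys : List String)
    (h : b x y = false) : PySem.List.insertBy b x (y :: ys) = y :: PySem.List.insertBy b x ys := by
  simp [PySem.List.insertBy, h]

theorem pv_clean_step_eq (st : List String × PySem.Set String) (x : String) :
    pv_clean_step st x =
      if PySem.Str.strip x ≠ "" ∧ PySem.Set.contains st.2 (PySem.Str.strip x) = false
      then (st.1 ++ [PySem.Str.strip x], PySem.Set.add st.2 (PySem.Str.strip x)) else st := rfl

theorem pv_dedup_go_none_cons (x : String) (rest out : List String) (seen : PySem.Set String) :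
    pv_dedup_go none (x :: rest) out seen =
      if PySem.Str.strip x = "" ∨ PySem.Set.contains seen (PySem.Str.strip x) = true
      then pv_dedup_go none rest out seen
      else pv_dedup_go none rest (out ++ [PySem.Str.strip x]) (PySem.Set.add seen (PySem.Str.strip x)) := by
  rw [pv_dedup_go]

-- dropWhile is idempotent
theorem pv_dropWhile_idem (p : Char → Bool) (l : List Char) :
    List.dropWhile p (List.dropWhile p l) = List.dropWhile p l := by
  induction l with
  | nil => simp
  | cons a as ih =>
    by_cases h : p a = true
    · simpa only [List.dropWhile_cons, h, if_pos h] using ih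
    · simp [h]

-- if dropWhile p fixes l, it fixes every prefix of l
theorem pv_dropWhile_prefix_fix (p : Char → Bool) (l1 l2 : List Char)
    (hpre : l1 <+: l2) (hfix : List.dropWhile p l2 = l2) :
    List.dropWhile p l1 = l1 := by
  cases l1 with
  | nil => simp
  | cons a as =>
    obtain ⟨t, ht⟩ := hpre
    subst ht
    simp only [List.cons_append, List.dropWhile_cons] at hfix ⊢
    by_cases h : p a = true
    · exfalso
      rw [if_pos h] at hfix
      have hl := congrArg List.length hfix
      have h2 := List.length_dropWhile_le p (as ++ t)
      simp only [List.length_cons] at hl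
      omega
    · simp [h]

theorem pv_rstrip_prefix (l : List Char) : PySem.Chars.rstrip l <+: l := by
  unfold PySem.Chars.rstrip
  have h : List.dropWhile PySem.Chars.isspace l.reverse <:+ l.reverse :=
    List.dropWhile_suffix _
  have h2 := List.reverse_prefix.mpr h
  simpa using h2

theorem pv_strip_chars_idem (cs : List Char) :
    PySem.Chars.strip (PySem.Chars.strip cs) = PySem.Chars.strip cs := by
  unfold PySem.Chars.strip PySem.Chars.lstrip
  have hfix : List.dropWhile PySem.Chars.isspace (List.dropWhile PySem.Chars.isspace cs)
      = List.dropWhile PySem.Chars.isspace cs := pv_dropWhile_idem _ cs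
  have hpre : PySem.Chars.rstrip (List.dropWhile PySem.Chars.isspace cs) <+:
      List.dropWhile PySem.Chars.isspace cs := pv_rstrip_prefix _
  have h1 : List.dropWhile PySem.Chars.isspace
        (PySem.Chars.rstrip (List.dropWhile PySem.Chars.isspace cs))
      = PySem.Chars.rstrip (List.dropWhile PySem.Chars.isspace cs) :=
    pv_dropWhile_prefix_fix _ _ _ hpre hfix
  rw [h1]
  unfold PySem.Chars.rstrip
  simp [pv_dropWhile_idem]

theorem pv_strip_idem (s : String) :
    PySem.Str.strip (PySem.Str.strip s) = PySem.Str.strip s := by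
  calc PySem.Str.strip (PySem.Str.strip s)
      = String.ofList (PySem.Chars.strip (PySem.Str.strip s).toList) := rfl
    _ = String.ofList (PySem.Chars.strip (PySem.Chars.strip s.toList)) := by
          rw [PySem.Str.toList_strip]
    _ = String.ofList (PySem.Chars.strip s.toList) := by rw [pv_strip_chars_idem]
    _ = PySem.Str.strip s := rfl

-- A's dedup loop (limit = None) computes the same list as B's fold
theorem pv_dedup_agree (l : List String) : ∀ (out : List String) (seen : PySem.Set String),
    pv_dedup_go none l out seen = (l.foldl pv_clean_step (out, seen)).1 := by
  induction l with
  | nil => intro out seen; rfl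
  | cons x rest ih =>
    intro out seen
    rw [pv_dedup_go_none_cons, List.foldl_cons, pv_clean_step_eq]
    split_ifs with h1 h2 h3
    · exfalso
      rcases h1 with h | h
      · exact h2.1 h
      · rw [h] at h2; simp at h2
    · exact ih _ _
    · exact ih _ _
    · exfalso
      apply h3
      refine ⟨fun he => h1 (Or.inl he), ?_⟩
      cases hb : PySem.Set.contains seen (PySem.Str.strip x)
      · rfl
      · exact absurd (Or.inr hb) h1

-- every element produced by B's fold is strip-fixed
theorem pv_clean_stripped (l : List String) : ∀ (out : List String) (seen : PySem.Set String),
    (∀ s ∈ out, PySem.Str.strip s = s) →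
    ∀ s ∈ (l.foldl pv_clean_step (out, seen)).1, PySem.Str.strip s = s := by
  induction l with
  | nil => intro out seen h s hs; exact h s hs
  | cons x rest ih =>
    intro out seen h s hs
    rw [List.foldl_cons, pv_clean_step_eq] at hs
    by_cases hc : PySem.Str.strip x ≠ "" ∧
        PySem.Set.contains seen (PySem.Str.strip x) = false
    · rw [if_pos hc] at hs
      refine ih _ _ ?_ s hs
      intro t ht
      rcases List.mem_append.mp ht with h1 | h1
      · exact h t h1
      · simp only [List.mem_singleton] at h1
        subst h1
        exact pv_strip_idem x
    · rw [if_neg hc] at hs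
      exact ih _ _ h s hs

-- A's classify fold appends the strong elements to .1 and the weak ones to .2
theorem pv_classify_eq (l : List String) (hstr : ∀ s ∈ l, PySem.Str.strip s = s) :
    ∀ a b, l.foldl pv_classify_step (a, b)
      = (a ++ l.filter pv_is_strong, b ++ l.filter (fun s => !pv_is_strong s)) := by
  induction l with
  | nil => intro a b; simp
  | cons x rest ih =>
    intro a b
    have hx : PySem.Str.strip x = x := hstr x (by simp)
    have hrest : ∀ s ∈ rest, PySem.Str.strip s = s := fun s hs => hstr s (by simp [hs])
    rw [List.foldl_cons]
    have hcond : pv_classify_step (a, b) x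
        = if pv_is_strong x then (a ++ [x], b) else (a, b ++ [x]) := by
      simp only [pv_classify_step, pv_is_strong, hx, Bool.or_assoc]
    rw [hcond]
    by_cases h : pv_is_strong x = true
    · rw [if_pos h, ih hrest]
      simp [h]
    · rw [if_neg h, ih hrest]
      simp only [Bool.not_eq_true] at h
      simp [h]

-- inserting a strong element into (strongs ++ weaks) puts it between them
theorem pv_insert_strong (x : String) (hx : pv_is_strong x = true) :
    ∀ (a b : List String), (∀ y ∈ a, pv_is_strong y = true) → (∀ y ∈ b, pv_is_strong y = false) →
    PySem.List.insertBy (fun u v => decide (pv_rank u < pv_rank v)) x (a ++ b) = a ++ x :: b := by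
  intro a
  induction a with
  | nil =>
    intro b _ hb
    cases b with
    | nil => simp [pv_insertBy_nil]
    | cons y ys =>
      have hy : pv_is_strong y = false := hb y (by simp)
      rw [List.nil_append,
        pv_insertBy_cons_pos _ _ _ _ (by simp [pv_rank, hx, hy]), List.nil_append]
  | cons z a' ih =>
    intro b ha hb
    have hz : pv_is_strong z = true := ha z (by simp)
    rw [List.cons_append,
      pv_insertBy_cons_neg _ _ _ _ (by simp [pv_rank, hx, hz]),
      ih b (fun y hy => ha y (by simp [hy])) hb, List.cons_append]

-- the stable-insertion fold with the 0/1 rank key splits into strong ++ weak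
theorem pv_sort_split (l : List String) : ∀ (a b : List String),
    (∀ y ∈ a, pv_is_strong y = true) → (∀ y ∈ b, pv_is_strong y = false) →
    l.foldl (fun acc x => PySem.List.insertBy (fun u v => decide (pv_rank u < pv_rank v)) x acc) (a ++ b)
      = (a ++ l.filter pv_is_strong) ++ (b ++ l.filter (fun s => !pv_is_strong s)) := by
  induction l with
  | nil => intro a b _ _; simp
  | cons x rest ih =>
    intro a b ha hb
    rw [List.foldl_cons]
    by_cases hx : pv_is_strong x = true
    · rw [pv_insert_strong x hx a b ha hb]
      have hsplit : a ++ x :: b = (a ++ [x]) ++ b := by simp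
      rw [hsplit, ih (a ++ [x]) b
        (fun y hy => by
          rcases List.mem_append.mp hy with h | h
          · exact ha y h
          · simp only [List.mem_singleton] at h; subst h; exact hx) hb]
      simp [hx]
    · have hall : ∀ y ∈ a ++ b, (decide (pv_rank x < pv_rank y)) = false := by
        intro y hy
        simp only [Bool.not_eq_true] at hx
        rcases List.mem_append.mp hy with h | h
        · simp [pv_rank, hx, ha y h]
        · simp [pv_rank, hx, hb y h]
      rw [PySem.List.insertBy_of_forall_not_before _ _ _ hall]
      have hsplit : (a ++ b) ++ [x] = a ++ (b ++ [x]) := by simp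
      rw [hsplit, ih a (b ++ [x]) ha
        (fun y hy => by
          rcases List.mem_append.mp hy with h | h
          · exact hb y h
          · simp only [List.mem_singleton] at h; subst h; simpa using hx)]
      simp only [Bool.not_eq_true] at hx
      simp [hx]

-- ===== VERDICT (by name: the statement is the Claim_ definition above) =====
theorem clean_file_paths_for_summary_py_spec : Claim_equal_clean_file_paths_for_summary_py := by
  intro items _
  show clean_file_paths_for_summary_py items = clean_file_paths_for_summary_py_alt items
  simp only [clean_file_paths_for_summary_py, clean_file_paths_for_summary_py_alt,
    pv_dedup_str_list]
  rw [pv_dedup_agree]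
  set cleaned := (items.foldl pv_clean_step ([], PySem.Set.empty)).1 with hcl
  have hstr : ∀ s ∈ cleaned, PySem.Str.strip s = s :=
    pv_clean_stripped items [] PySem.Set.empty (by simp)
  have hsorted : PySem.List.sorted cleaned pv_rank
      = cleaned.filter pv_is_strong ++ cleaned.filter (fun s => !pv_is_strong s) := by
    rw [PySem.List.sorted_eq_foldl_insertBy]
    simpa using pv_sort_split cleaned [] [] (by simp) (by simp)
  by_cases hnil : cleaned = []
  · rw [if_pos hnil, hnil]
    rfl
  · rw [if_neg hnil, pv_classify_eq cleaned hstr [] []]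
    rw [hsorted]
    simp
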